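-- pv_equiv track=rewrite | github.com/babyhuynwoo/coding_test_repo | Algorithms/binary_search_Algorithm/making_dduck/solution.py | making
-- ===== SOURCE A (Python) =====
-- def making(arr, M):
--     start = 0
--     end = max(arr)
--     answer = 0
--
--     while start <= end:
--         total = 0
--         mid = (start + end) // 2
--
--         for x in arr:
--             if x > mid:
--                 total += x - mid
--
--         if total < M:
--             end = mid - 1
--         else:
--             start = mid + 1
--             answer = mid
--
--     return answer
-- ===== SOURCE B (Python) =====
-- def making(arr, M):
--     s = sorted(arr)
--     n = len(s)
--     pre = [0]
--     acc = 0
--     for v in s: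
--         acc += v
--         pre.append(acc)
--     total = pre[n]
--     lo = 0
--     hi = s[-1]
--     answer = 0
--     while lo <= hi:
--         mid = (lo + hi) // 2
--         # count elements <= mid by hand-written binary search (bisect_right)
--         a, b = 0, n
--         while a < b:
--             m = (a + b) // 2
--             if s[m] <= mid:
--                 a = m + 1
--             else:
--                 b = m
--         removed = (total - pre[a]) - (n - a) * mid
--         if removed < M:
--             hi = mid - 1
--         else:
--             lo = mid + 1
--             answer = mid
--     return answer
-- ===== Notes on version B (the rewrite author's own statement) =====
-- stated objective: alternative
-- what changed: B sorts the array once and builds a prefix-sum table, then answers each probed height of the outer binary search with a hand-written bisect over the sorted array instead of A's full rescan of the array per probed height.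
-- outside the precondition, e.g. on making([], 5): A raises ValueError, B raises IndexError
import Mathlib
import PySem

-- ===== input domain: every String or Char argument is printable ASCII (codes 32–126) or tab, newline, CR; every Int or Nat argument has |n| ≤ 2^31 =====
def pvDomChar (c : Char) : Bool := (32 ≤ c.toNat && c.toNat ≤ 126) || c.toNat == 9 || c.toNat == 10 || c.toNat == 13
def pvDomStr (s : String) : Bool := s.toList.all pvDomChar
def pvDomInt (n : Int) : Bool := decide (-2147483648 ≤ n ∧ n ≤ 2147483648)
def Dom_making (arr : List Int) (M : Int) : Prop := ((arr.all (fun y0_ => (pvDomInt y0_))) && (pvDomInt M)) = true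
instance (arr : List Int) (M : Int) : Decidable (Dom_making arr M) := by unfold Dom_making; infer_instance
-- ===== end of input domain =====

-- B sorts the array once and builds a prefix-sum table, then answers each probed height of
-- the outer binary search by a hand-written bisect on the sorted array instead of A's full
-- rescan of the array (alternative algorithm; not measured faster on the timing inputs).

-- ===== PORT A =====
-- the inner 'for x in arr' accumulation of A, one loop iteration of the while
def totalA (arr : List Int) (mid : Int) : Int :=
  arr.foldl (fun total x => if x > mid then total + (x - mid) else total) 0

-- A's while loop (start/end/answer state); terminates because the interval shrinks
def loopA (arr : List Int) (M start e answer : Int) : Int :=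
  if h : start ≤ e then
    let mid := PySem.Int.floordiv (start + e) 2
    if totalA arr mid < M then loopA arr M start (mid - 1) answer
    else loopA arr M (mid + 1) e mid
  else answer
termination_by (e - start + 1).toNat
decreasing_by
  · have := PySem.Int.floordiv_two_mid_bounds h; omega
  · have := PySem.Int.floordiv_two_mid_bounds h; omega

-- 'max(arr)' raises on [], excluded by Pre_making; .getD 0 is the total stand-in there
def making (arr : List Int) (M : Int) : Int :=
  loopA arr M 0 ((PySem.List.max? arr (fun x => x)).getD 0) 0

-- ===== PORT B =====
-- Source B's hand-written bisect_right inner while loop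
def bisectR (s : List Int) (x a b : Int) : Int :=
  if h : a < b then
    let m := PySem.Int.floordiv (a + b) 2
    if PySem.List.pyGetD s m 0 ≤ x then bisectR s x (m + 1) b
    else bisectR s x a m
  else a
termination_by (b - a).toNat
decreasing_by
  · have := PySem.Int.floordiv_two_mid_bounds (le_of_lt h); omega
  · have := PySem.Int.floordiv_two_mid_bounds (le_of_lt h)
    have hlt : PySem.Int.floordiv (a + b) 2 < b := by
      rw [PySem.Int.floordiv_lt_iff_lt_mul (by omega)]; omega
    omega

-- Source B's prefix-table loop: state (acc, pre), pre grows by append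
def buildPre (s : List Int) : Int × List Int :=
  s.foldl (fun st v => (st.1 + v, st.2 ++ [st.1 + v])) (0, [0])

-- Source B's outer while loop (lo/hi/answer state)
def loopB (s pre : List Int) (total M lo hi answer : Int) : Int :=
  if h : lo ≤ hi then
    let mid := PySem.Int.floordiv (lo + hi) 2
    let a := bisectR s mid 0 (s.length : Int)
    if (total - PySem.List.pyGetD pre a 0) - ((s.length : Int) - a) * mid < M then
      loopB s pre total M lo (mid - 1) answer
    else loopB s pre total M (mid + 1) hi mid
  else answer
termination_by (hi - lo + 1).toNat
decreasing_by
  · have := PySem.Int.floordiv_two_mid_bounds h; omega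
  · have := PySem.Int.floordiv_two_mid_bounds h; omega

-- 's[-1]' raises on [], excluded by Pre_making; .pyGetD default 0 is the stand-in there
def making_alt (arr : List Int) (M : Int) : Int :=
  let s := PySem.List.sorted arr (fun x => x)
  let pre := (buildPre s).2
  let total := PySem.List.pyGetD pre (s.length : Int) 0
  loopB s pre total M 0 (PySem.List.pyGetD s (-1) 0) 0

-- ===== PRECONDITION & SPEC =====
-- Pre_ excludes only the empty list, on which A raises ValueError (max of empty sequence).
def Pre_making (arr : List Int) (M : Int) : Prop := arr ≠ []
instance (arr : List Int) (M : Int) : Decidable (Pre_making arr M) := by unfold Pre_making; infer_instance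
def pvWitness_making : List Int × Int := ([2, 4, 1], 3)

def Spec_making (arr : List Int) (M : Int) (out : Int) : Prop := out = making_alt arr M
instance (arr : List Int) (M : Int) (out : Int) : Decidable (Spec_making arr M out) := by unfold Spec_making; infer_instance

-- ===== CLAIM (what is proved, stated in full; the proofs are below) =====
def Claim_equal_making : Prop := ∀ (arr : List Int) (M : Int), Dom_making arr M → Pre_making arr M → Spec_making arr M (making arr M)

-- ===== LEMMAS AND PROOFS =====

theorem totalA_eq_sum (arr : List Int) (mid : Int) :
    totalA arr mid = (arr.map (fun x => if x > mid then x - mid else 0)).sum := by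
  have h : ∀ (l : List Int) (c : Int),
      l.foldl (fun total x => if x > mid then total + (x - mid) else total) c
        = c + (l.map (fun x => if x > mid then x - mid else 0)).sum := by
    intro l
    induction l with
    | nil => simp
    | cons v t ih => intro c; simp only [List.foldl_cons, List.map_cons, List.sum_cons, ih]; split <;> ring
  simpa using h arr 0

theorem buildPre_aux (s : List Int) : ∀ (acc : Int) (l : List Int),
    (s.foldl (fun st v => (st.1 + v, st.2 ++ [st.1 + v])) (acc, l)).2
      = l ++ (List.range s.length).map (fun k => acc + (s.take (k + 1)).sum) := by
  induction s with
  | nil => simp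
  | cons v t ih =>
    intro acc l
    simp only [List.foldl_cons, ih, List.length_cons, List.range_succ_eq_map, List.map_cons,
      List.map_map]
    simp [Function.comp, List.append_assoc]
    intro k hk
    ring

theorem buildPre_snd (s : List Int) :
    (buildPre s).2 = (List.range (s.length + 1)).map (fun k => (s.take k).sum) := by
  unfold buildPre
  rw [buildPre_aux s 0 [0]]
  rw [List.range_succ_eq_map, List.map_cons, List.map_map]
  simp [Function.comp]

theorem pre_getD (s : List Int) (i : Int) (h0 : 0 ≤ i) (h1 : i ≤ (s.length : Int)) :
    PySem.List.pyGetD (buildPre s).2 i 0 = (s.take i.toNat).sum := by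
  rw [buildPre_snd]
  rw [PySem.List.pyGetD_eq_getElem _ _ h0 (by simp; omega)]
  rw [List.getElem_map, List.getElem_range]

-- bisect_right invariant on a sorted list
theorem bisectR_spec (s : List Int) (x : Int) (hs : s.Pairwise (· ≤ ·)) :
    ∀ (a b : Int), 0 ≤ a → a ≤ b → b ≤ (s.length : Int) →
    (∀ j : Nat, (j : Int) < a → ∀ hj : j < s.length, s[j] ≤ x) →
    (∀ j : Nat, b ≤ (j : Int) → ∀ hj : j < s.length, x < s[j]) →
    0 ≤ bisectR s x a b ∧ bisectR s x a b ≤ (s.length : Int) ∧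
    (∀ j : Nat, (j : Int) < bisectR s x a b → ∀ hj : j < s.length, s[j] ≤ x) ∧
    (∀ j : Nat, bisectR s x a b ≤ (j : Int) → ∀ hj : j < s.length, x < s[j]) := by
  intro a b
  fun_induction bisectR s x a b with
  | case1 a b hab m hle ih =>
    intro ha0 hab' hbn hlow hhigh
    have hmdef : m = PySem.Int.floordiv (a + b) 2 := rfl
    have hm := PySem.Int.floordiv_two_mid_bounds (le_of_lt hab)
    have hmb : m < b := by
      rw [hmdef, PySem.Int.floordiv_lt_iff_lt_mul (by omega)]; omega
    have hmn : m.toNat < s.length := by omega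
    have hms : s[m.toNat] ≤ x := by
      rw [PySem.List.pyGetD_eq_getElem s 0 (by omega) (by omega)] at hle
      exact hle
    apply ih (by omega) (by omega) hbn
    · intro j hj hjlen
      rcases lt_or_ge j m.toNat with hlt | hge
      · calc s[j] ≤ s[m.toNat] := (List.pairwise_iff_getElem.mp hs) j m.toNat hjlen hmn hlt
          _ ≤ x := hms
      · have : j = m.toNat := by omega
        subst this; exact hms
    · exact hhigh
  | case2 a b hab m hgt ih =>
    intro ha0 hab' hbn hlow hhigh
    have hmdef : m = PySem.Int.floordiv (a + b) 2 := rfl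
    have hm := PySem.Int.floordiv_two_mid_bounds (le_of_lt hab)
    have hmb : m < b := by
      rw [hmdef, PySem.Int.floordiv_lt_iff_lt_mul (by omega)]; omega
    have hmn : m.toNat < s.length := by omega
    have hms : x < s[m.toNat] := by
      rw [PySem.List.pyGetD_eq_getElem s 0 (by omega) (by omega)] at hgt
      omega
    apply ih ha0 (by omega) (by omega) hlow
    · intro j hj hjlen
      rcases lt_or_ge m.toNat j with hlt | hge
      · calc x < s[m.toNat] := hms
          _ ≤ s[j] := (List.pairwise_iff_getElem.mp hs) m.toNat j hmn hjlen hlt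
      · have : j = m.toNat := by omega
        subst this; exact hms
  | case3 a b hab =>
    intro ha0 hab' hbn hlow hhigh
    exact ⟨ha0, by omega, hlow, fun j hj => hhigh j (by omega)⟩

theorem sum_take_drop (s : List Int) (k : Nat) : (s.take k).sum + (s.drop k).sum = s.sum := by
  conv_rhs => rw [← List.take_append_drop k s]
  rw [List.sum_append]

-- B's bisect + prefix-table surplus query equals A's rescan total
theorem query_eq (arr : List Int) (mid : Int) :
    (PySem.List.pyGetD (buildPre (PySem.List.sorted arr (fun x => x))).2
        ((PySem.List.sorted arr (fun x => x)).length : Int) 0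
      - PySem.List.pyGetD (buildPre (PySem.List.sorted arr (fun x => x))).2
          (bisectR (PySem.List.sorted arr (fun x => x)) mid 0
            ((PySem.List.sorted arr (fun x => x)).length : Int)) 0)
      - (((PySem.List.sorted arr (fun x => x)).length : Int)
          - bisectR (PySem.List.sorted arr (fun x => x)) mid 0
              ((PySem.List.sorted arr (fun x => x)).length : Int)) * mid
      = totalA arr mid := by
  set s := PySem.List.sorted arr (fun x => x) with hsdef
  have hs : s.Pairwise (· ≤ ·) := PySem.List.sorted_pairwise arr (fun x => x)
  obtain ⟨hi0, hin, hlow, hhigh⟩ :=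
    bisectR_spec s mid hs 0 (s.length : Int) le_rfl (by positivity) le_rfl
      (by intro j hj _; omega) (by intro j hj hjlen; omega)
  set i := bisectR s mid 0 (s.length : Int) with hidef
  -- rewrite the table lookups
  rw [pre_getD s _ (by positivity) le_rfl, pre_getD s _ hi0 hin]
  simp only [Int.toNat_natCast, List.take_length]
  -- totalA over arr = totalA over the sorted s (permutation)
  have hperm : totalA arr mid = totalA s mid := by
    rw [totalA_eq_sum, totalA_eq_sum]
    exact (List.Perm.sum_eq (List.Perm.map _ (PySem.List.sorted_perm arr (fun x => x) false))).symm
  rw [hperm, totalA_eq_sum]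
  -- split s at i
  have hsplit : s = s.take i.toNat ++ s.drop i.toNat := (List.take_append_drop _ s).symm
  have hlen_take : (s.take i.toNat).length = i.toNat := by simp; omega
  have hlen_drop : (s.drop i.toNat).length = s.length - i.toNat := by simp
  have htake0 : ((s.take i.toNat).map (fun x => if x > mid then x - mid else 0)).sum = 0 := by
    apply List.sum_eq_zero
    intro y hy
    simp only [List.mem_map] at hy
    obtain ⟨z, hz, rfl⟩ := hy
    obtain ⟨j, hj, rfl⟩ := List.getElem_of_mem hz
    rw [List.getElem_take] at *
    have := hlow j (by omega) (by omega)
    simp; omega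
  have hdrop : ((s.drop i.toNat).map (fun x => if x > mid then x - mid else 0)).sum
      = (s.drop i.toNat).sum - ((s.length : Int) - i) * mid := by
    have : (s.drop i.toNat).map (fun x => if x > mid then x - mid else 0)
        = (s.drop i.toNat).map (fun x => x - mid) := by
      apply List.map_congr_left
      intro z hz
      obtain ⟨j, hj, rfl⟩ := List.getElem_of_mem hz
      rw [List.getElem_drop] at *
      have := hhigh (i.toNat + j) (by omega) (by omega)
      simp; omega
    rw [this]
    have hsum : ((s.drop i.toNat).map (fun x => x - mid)).sum
        = (s.drop i.toNat).sum - ((s.drop i.toNat).length : Int) * mid := by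
      induction (s.drop i.toNat) with
      | nil => simp
      | cons v t ih => simp only [List.map_cons, List.sum_cons, ih, List.length_cons]; push_cast; ring
    rw [hsum, hlen_drop]
    have hcast : ((s.length - i.toNat : Nat) : Int) = (s.length : Int) - i := by omega
    rw [hcast]
  calc s.sum - (s.take i.toNat).sum - ((s.length : Int) - i) * mid
      = (s.drop i.toNat).sum - ((s.length : Int) - i) * mid := by
        have := sum_take_drop s i.toNat; omega
    _ = ((s.drop i.toNat).map (fun x => if x > mid then x - mid else 0)).sum := hdrop.symm
    _ = ((s.take i.toNat).map (fun x => if x > mid then x - mid else 0)).sum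
        + ((s.drop i.toNat).map (fun x => if x > mid then x - mid else 0)).sum := by rw [htake0]; ring
    _ = (s.map (fun x => if x > mid then x - mid else 0)).sum := by
        conv_rhs => rw [hsplit]
        rw [List.map_append, List.sum_append]
  
-- the two while loops agree step by step once the per-height totals agree
theorem loop_eq (arr s pre : List Int) (total M : Int)
    (hq : ∀ mid, (total - PySem.List.pyGetD pre (bisectR s mid 0 (s.length : Int)) 0)
        - ((s.length : Int) - bisectR s mid 0 (s.length : Int)) * mid = totalA arr mid) :
    ∀ (lo hi ans : Int), loopB s pre total M lo hi ans = loopA arr M lo hi ans := by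
  intro lo hi ans
  fun_induction loopA arr M lo hi ans with
  | case1 lo hi ans hle mid hlt ih =>
    rw [loopB, dif_pos hle]
    simp only [hq] at *
    rw [if_pos hlt, ih]
  | case2 lo hi ans hle mid hlt ih =>
    rw [loopB, dif_pos hle]
    simp only [hq] at *
    rw [if_neg hlt, ih]
  | case3 lo hi ans hle =>
    rw [loopB, dif_neg hle]

-- max(arr) = sorted(arr)[-1] on a nonempty list
theorem max_eq_last (arr : List Int) (hne : arr ≠ []) :
    ((PySem.List.max? arr (fun x => x)).getD 0)
      = PySem.List.pyGetD (PySem.List.sorted arr (fun x => x)) (-1) 0 := by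
  set s := PySem.List.sorted arr (fun x => x) with hsdef
  have hsne : s ≠ [] := by
    rw [hsdef, ne_eq, PySem.List.sorted_eq_nil_iff]; exact hne
  rw [PySem.List.pyGetD_neg_one s 0 hsne]
  obtain ⟨m, hm⟩ : ∃ m, PySem.List.max? arr (fun x => x) = some m := by
    cases h : PySem.List.max? arr (fun x => x) with
    | none => exact absurd ((PySem.List.max?_eq_none_iff _ _).mp h) hne
    | some m => exact ⟨m, rfl⟩
  rw [hm, Option.getD_some]
  have hmmax : ∀ y ∈ arr, y ≤ m := PySem.List.max?_isMax hm
  have hmem : m ∈ arr := PySem.List.max?_mem hm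
  have hlast_mem : s.getLast hsne ∈ arr := by
    rw [← PySem.List.mem_sorted arr (fun x => x) false]
    exact List.getLast_mem hsne
  apply le_antisymm
  · -- m ≤ last: m ∈ s, and last is the max of the sorted list
    have hm_in_s : m ∈ s := by rw [hsdef, PySem.List.mem_sorted]; exact hmem
    obtain ⟨p, hp, hpe⟩ := List.getElem_of_mem hm_in_s
    rw [List.getLast_eq_getElem]
    have h0 : 0 < s.length := List.length_pos_iff.mpr hsne
    have hmono := PySem.List.sorted_id_getElem_mono arr (p := p) (q := s.length - 1)
      (by omega) (by rw [← hsdef]; omega)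
    rw [← hpe]
    exact hmono
  · exact hmmax _ hlast_mem

-- ===== VERDICT (by name: the statement is the Claim_ definition above) =====
theorem making_spec : Claim_equal_making := by
  intro arr M _ hne
  unfold Spec_making making making_alt
  set s := PySem.List.sorted arr (fun x => x) with hsdef
  have htotal : PySem.List.pyGetD (buildPre s).2 (s.length : Int) 0 = s.sum := by
    rw [pre_getD s _ (by positivity) le_rfl]
    simp
  rw [loop_eq arr s (buildPre s).2 _ M (fun mid => by rw [← htotal] at *; exact query_eq arr mid),
    max_eq_last arr hne]
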